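-- pv_equiv track=rewrite | github.com/rangoren/clinical-agent | services/study_service.py | _family_first_candidates
-- ===== SOURCE A (Python) =====
-- def _recent_unique_topics(state, limit=4):
--     recent_topics = state.get("recent_topic_history") or []
--     deduped = []
--     seen = set()
--     for topic in reversed(recent_topics):
--         if not topic or topic in seen:
--             continue
--         seen.add(topic)
--         deduped.append(topic)
--         if len(deduped) >= limit:
--             break
--     return set(deduped)
--
-- OBSTETRIC_ENTRY_TOPICS = {
--     "Preeclampsia",
--     "PPH",
--     "CTG",
--     "PPROM",
-- }
--
-- def _topic_family(topic):
--     if topic in OBSTETRIC_ENTRY_TOPICS: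
--         return "obstetrics"
--     if topic == "Fertility":
--         return "fertility"
--     if topic in {"Gynecologic oncology", "Cervical screening"}:
--         return "gynecologic_oncology"
--     return "gynecology"
--
-- def _recent_unique_families(state, limit=4):
--     recent_topics = state.get("recent_topic_history") or []
--     deduped = []
--     seen = set()
--     for topic in reversed(recent_topics):
--         family = _topic_family(topic)
--         if not family or family in seen:
--             continue
--         seen.add(family)
--         deduped.append(family)
--         if len(deduped) >= limit:
--             break
--     return set(deduped)
--
-- def _coverage_first_candidates(candidates, state, used_topics=None):
--     if not candidates:
--         return []
--
--     used_topics = set(used_topics or set())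
--     recent_topics = _recent_unique_topics(state, limit=4)
--
--     fresh_topic_candidates = [
--         item for item in candidates
--         if item.get("topic") not in used_topics and item.get("topic") not in recent_topics
--     ]
--     if fresh_topic_candidates:
--         return fresh_topic_candidates
--
--     unused_in_card_candidates = [item for item in candidates if item.get("topic") not in used_topics]
--     if unused_in_card_candidates:
--         return unused_in_card_candidates
--
--     return candidates
--
-- def _family_first_candidates(candidates, state, used_topics=None, used_families=None):
--     candidates = _coverage_first_candidates(candidates, state, used_topics=used_topics)
--     if not candidates:
--         return []
--
--     used_families = set(used_families or set())
--     recent_families = _recent_unique_families(state, limit=4)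
--
--     fresh_family_candidates = [
--         item for item in candidates
--         if _topic_family(item.get("topic")) not in used_families
--         and _topic_family(item.get("topic")) not in recent_families
--     ]
--     if fresh_family_candidates:
--         return fresh_family_candidates
--
--     unused_family_candidates = [
--         item for item in candidates
--         if _topic_family(item.get("topic")) not in used_families
--     ]
--     if unused_family_candidates:
--         return unused_family_candidates
--
--     return candidates
-- ===== SOURCE B (Python) =====
-- OBSTETRIC_ENTRY_TOPICS = {
--     "Preeclampsia",
--     "PPH",
--     "CTG",
--     "PPROM",
-- }
--
-- def _topic_family(topic):
--     if topic in OBSTETRIC_ENTRY_TOPICS: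
--         return "obstetrics"
--     if topic == "Fertility":
--         return "fertility"
--     if topic in {"Gynecologic oncology", "Cervical screening"}:
--         return "gynecologic_oncology"
--     return "gynecology"
--
-- def _recent_values(state, key_fn, limit=4):
--     seen = []
--     for raw in reversed(state.get("recent_topic_history") or []):
--         v = key_fn(raw)
--         if v and v not in seen:
--             seen.append(v)
--             if len(seen) == limit:
--                 break
--     return seen
--
-- def _min_tier_select(candidates, tier):
--     tiers = [tier(item) for item in candidates]
--     best = min(tiers)
--     return [item for item, t in zip(candidates, tiers) if t == best]
--
-- def _family_first_candidates(candidates, state, used_topics=None, used_families=None):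
--     if not candidates:
--         return []
--     used_t = set(used_topics or ())
--     recent_t = _recent_values(state, lambda t: t)
--     def topic_tier(item):
--         t = item.get("topic")
--         if t in used_t:
--             return 2
--         return 1 if t in recent_t else 0
--     candidates = _min_tier_select(candidates, topic_tier)
--     used_f = set(used_families or ())
--     recent_f = _recent_values(state, _topic_family)
--     def family_tier(item):
--         f = _topic_family(item.get("topic"))
--         if f in used_f:
--             return 2
--         return 1 if f in recent_f else 0
--     return _min_tier_select(candidates, family_tier)
-- ===== Notes on version B (the rewrite author's own statement) =====
-- stated objective: alternative
-- what changed: Replaces each three-comprehension fallback cascade (fresh, else unused, else all) with a single tiering pass: compute a tier 0/1/2 per candidate from the same membership sets, take min, keep candidates of the minimal tier; the two recent-history dedup loops are unified into one key-parameterised helper.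
import Mathlib
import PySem

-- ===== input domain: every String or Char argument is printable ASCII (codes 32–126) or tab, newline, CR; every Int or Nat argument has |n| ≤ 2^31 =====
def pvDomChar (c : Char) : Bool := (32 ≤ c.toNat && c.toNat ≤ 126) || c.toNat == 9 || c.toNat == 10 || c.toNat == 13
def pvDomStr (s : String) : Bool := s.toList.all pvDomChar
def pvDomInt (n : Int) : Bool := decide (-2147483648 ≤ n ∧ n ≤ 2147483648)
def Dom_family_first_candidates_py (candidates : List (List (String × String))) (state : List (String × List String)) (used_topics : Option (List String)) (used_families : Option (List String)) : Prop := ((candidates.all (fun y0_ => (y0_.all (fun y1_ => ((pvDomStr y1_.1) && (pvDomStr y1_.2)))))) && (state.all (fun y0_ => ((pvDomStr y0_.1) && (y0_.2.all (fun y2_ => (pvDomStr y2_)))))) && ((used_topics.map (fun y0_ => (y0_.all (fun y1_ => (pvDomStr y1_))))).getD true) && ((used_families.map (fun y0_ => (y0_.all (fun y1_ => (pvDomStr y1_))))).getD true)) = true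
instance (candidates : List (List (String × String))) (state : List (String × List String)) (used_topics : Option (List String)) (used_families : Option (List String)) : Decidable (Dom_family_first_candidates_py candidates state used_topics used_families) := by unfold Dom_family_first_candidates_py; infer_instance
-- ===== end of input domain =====

-- ===== PORT A =====
-- B replaces A's two three-comprehension fallback cascades by a single min-tier selection pass
-- (same return value; neither version mutates its arguments).

-- shared module helper _topic_family (identical in Source A and Source B); takes the Option
-- because A applies it to item.get("topic"), which may be missing (None).
def topicFamily (t : Option String) : String :=
  if t = some "Preeclampsia" ∨ t = some "PPH" ∨ t = some "CTG" ∨ t = some "PPROM" then "obstetrics"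
  else if t = some "Fertility" then "fertility"
  else if t = some "Gynecologic oncology" ∨ t = some "Cervical screening" then "gynecologic_oncology"
  else "gynecology"

-- 'o in s' for o = item.get("topic") : Option String against a set of strings (None is never a member)
def optIn (t : Option String) (s : List String) : Bool :=
  match t with
  | none => false
  | some v => s.contains v

-- the loop of _recent_unique_topics (limit = 4, the only value used)
def recentTopicsLoopA : List String → List String → PySem.Set String → List String
  | [], ded, _ => ded
  | t :: rest, ded, seen =>
    if t = "" ∨ seen.contains t then recentTopicsLoopA rest ded seen
    else
      let seen' := seen.add t
      let ded' := ded ++ [t]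
      if 4 ≤ ded'.length then ded' else recentTopicsLoopA rest ded' seen'

def recentUniqueTopicsA (state : List (String × List String)) : PySem.Set String :=
  let recent := ((PySem.Dict.ofList state).get? "recent_topic_history").getD []
  PySem.Set.ofList (recentTopicsLoopA recent.reverse [] PySem.Set.empty)

-- the loop of _recent_unique_families (limit = 4)
def recentFamiliesLoopA : List String → List String → PySem.Set String → List String
  | [], ded, _ => ded
  | t :: rest, ded, seen =>
    let family := topicFamily (some t)
    if family = "" ∨ seen.contains family then recentFamiliesLoopA rest ded seen
    else
      let seen' := seen.add family
      let ded' := ded ++ [family]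
      if 4 ≤ ded'.length then ded' else recentFamiliesLoopA rest ded' seen'

def recentUniqueFamiliesA (state : List (String × List String)) : PySem.Set String :=
  let recent := ((PySem.Dict.ofList state).get? "recent_topic_history").getD []
  PySem.Set.ofList (recentFamiliesLoopA recent.reverse [] PySem.Set.empty)

def coverageFirstA (candidates : List (List (String × String))) (state : List (String × List String))
    (used_topics : Option (List String)) : List (List (String × String)) :=
  if candidates = [] then []
  else
    let used := PySem.Set.ofList (used_topics.getD [])
    let recent := recentUniqueTopicsA state
    let fresh := candidates.filter (fun item =>
      !optIn ((PySem.Dict.ofList item).get? "topic") used &&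
      !optIn ((PySem.Dict.ofList item).get? "topic") recent)
    if fresh ≠ [] then fresh
    else
      let unused := candidates.filter (fun item => !optIn ((PySem.Dict.ofList item).get? "topic") used)
      if unused ≠ [] then unused
      else candidates

def family_first_candidates_py (candidates : List (List (String × String))) (state : List (String × List String)) (used_topics : Option (List String)) (used_families : Option (List String)) : List (List (String × String)) :=
  let candidates := coverageFirstA candidates state used_topics
  if candidates = [] then []
  else
    let usedF := PySem.Set.ofList (used_families.getD [])
    let recentF := recentUniqueFamiliesA state
    let fresh := candidates.filter (fun item =>
      !usedF.contains (topicFamily ((PySem.Dict.ofList item).get? "topic")) &&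
      !recentF.contains (topicFamily ((PySem.Dict.ofList item).get? "topic")))
    if fresh ≠ [] then fresh
    else
      let unused := candidates.filter (fun item =>
        !usedF.contains (topicFamily ((PySem.Dict.ofList item).get? "topic")))
      if unused ≠ [] then unused
      else candidates

-- ===== PORT B =====
-- the loop of _recent_values (limit = 4), parameterised by the key function
def recentGoB (key : String → String) : List String → List String → List String
  | [], seen => seen
  | raw :: rest, seen =>
    let v := key raw
    if v ≠ "" ∧ ¬ seen.contains v then
      let seen' := seen ++ [v]
      if seen'.length = 4 then seen' else recentGoB key rest seen'
    else recentGoB key rest seen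

def recentValuesB (state : List (String × List String)) (key : String → String) : List String :=
  recentGoB key (((PySem.Dict.ofList state).get? "recent_topic_history").getD []).reverse []

def minTierSelectB {α : Type} (candidates : List α) (tier : α → Nat) : List α :=
  let tiers := candidates.map tier
  match PySem.List.min? tiers (fun t => t) with
  | none => []  -- unreachable: min(tiers) is only taken on nonempty candidates
  | some best => (candidates.zip tiers).filterMap (fun p => if p.2 = best then some p.1 else none)

def family_first_candidates_py_alt (candidates : List (List (String × String))) (state : List (String × List String)) (used_topics : Option (List String)) (used_families : Option (List String)) : List (List (String × String)) :=
  if candidates = [] then []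
  else
    let usedT := PySem.Set.ofList (used_topics.getD [])
    let recentT := recentValuesB state (fun t => t)
    let candidates := minTierSelectB candidates (fun item =>
      let t := (PySem.Dict.ofList item).get? "topic"
      if optIn t usedT then 2 else if optIn t recentT then 1 else 0)
    let usedF := PySem.Set.ofList (used_families.getD [])
    let recentF := recentValuesB state (fun t => topicFamily (some t))
    minTierSelectB candidates (fun item =>
      let f := topicFamily ((PySem.Dict.ofList item).get? "topic")
      if usedF.contains f then 2 else if recentF.contains f then 1 else 0)
-- ===== PRECONDITION & SPEC =====
def Spec_family_first_candidates_py (candidates : List (List (String × String))) (state : List (String × List String)) (used_topics : Option (List String)) (used_families : Option (List String)) (out : List (List (String × String))) : Prop := out = family_first_candidates_py_alt candidates state used_topics used_families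
instance (candidates : List (List (String × String))) (state : List (String × List String)) (used_topics : Option (List String)) (used_families : Option (List String)) (out : List (List (String × String))) : Decidable (Spec_family_first_candidates_py candidates state used_topics used_families out) := by unfold Spec_family_first_candidates_py; infer_instance

-- ===== CLAIM (what is proved, stated in full; the proofs are below) =====
def Claim_equal_family_first_candidates_py : Prop := ∀ (candidates : List (List (String × String))) (state : List (String × List String)) (used_topics : Option (List String)) (used_families : Option (List String)), Dom_family_first_candidates_py candidates state used_topics used_families → Spec_family_first_candidates_py candidates state used_topics used_families (family_first_candidates_py candidates state used_topics used_families)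

-- ===== LEMMAS AND PROOFS =====

-- membership in set(xs) is membership in xs
theorem containsOfList (l : List String) (v : String) :
    (PySem.Set.ofList l).contains v = l.contains v := by
  rcases h : l.contains v with _ | _
  · simp only [PySem.Set.contains_eq_listContains]
    simp only [List.contains_eq_mem, decide_eq_false_iff_not] at *
    simpa [PySem.Set.mem_ofList] using h
  · simp only [PySem.Set.contains_eq_listContains]
    simp only [List.contains_eq_mem, decide_eq_true_eq] at *
    simpa [PySem.Set.mem_ofList] using h

theorem optInOfList (t : Option String) (l : List String) :
    optIn t (PySem.Set.ofList l) = optIn t l := by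
  cases t
  · rfl
  · simp only [optIn]
    exact containsOfList l _

theorem existsOfFilterNeNil {α : Type} {p : α → Bool} {l : List α} (h : l.filter p ≠ []) :
    ∃ x ∈ l, p x = true := by
  by_contra hno
  push_neg at hno
  exact h (List.filter_eq_nil_iff.mpr (by intro a ha; simpa using hno a ha))

-- A's topic dedup loop (seen as a set) equals B's single-accumulator loop with the identity key
theorem topicsLoopEq : ∀ (l ded : List String), ded.length < 4 →
    recentTopicsLoopA l ded ded = recentGoB (fun t => t) l ded := by
  intro l
  induction l with
  | nil => intro ded _; rfl
  | cons t rest ih =>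
    intro ded hlen
    simp only [recentTopicsLoopA, recentGoB, PySem.Set.contains_eq_listContains]
    by_cases hskip : t = "" ∨ ded.contains t = true
    · rw [if_pos hskip, if_neg (by tauto), ih ded hlen]
    · push_neg at hskip
      have hnm : t ∉ ded := by
        simpa [List.contains_eq_mem] using hskip.2
      rw [if_neg (by tauto), PySem.Set.add_of_not_mem hnm,
          if_pos (show t ≠ "" ∧ ¬ded.contains t = true from ⟨hskip.1, hskip.2⟩)]
      have h4 : (ded ++ [t]).length = ded.length + 1 := by simp
      rw [h4]
      by_cases hb : ded.length + 1 = 4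
      · rw [if_pos (show 4 ≤ ded.length + 1 by omega), if_pos hb]
      · rw [if_neg (show ¬4 ≤ ded.length + 1 by omega), if_neg hb, ih _ (by omega)]

-- A's family dedup loop equals B's loop with the family key
theorem familiesLoopEq : ∀ (l ded : List String), ded.length < 4 →
    recentFamiliesLoopA l ded ded = recentGoB (fun t => topicFamily (some t)) l ded := by
  intro l
  induction l with
  | nil => intro ded _; rfl
  | cons t rest ih =>
    intro ded hlen
    simp only [recentFamiliesLoopA, recentGoB, PySem.Set.contains_eq_listContains]
    by_cases hskip : topicFamily (some t) = "" ∨ ded.contains (topicFamily (some t)) = true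
    · rw [if_pos hskip, if_neg (by tauto), ih ded hlen]
    · push_neg at hskip
      have hnm : topicFamily (some t) ∉ ded := by
        simpa [List.contains_eq_mem] using hskip.2
      rw [if_neg (by tauto), PySem.Set.add_of_not_mem hnm,
          if_pos (show topicFamily (some t) ≠ "" ∧ ¬ded.contains (topicFamily (some t)) = true from
            ⟨hskip.1, hskip.2⟩)]
      have h4 : (ded ++ [topicFamily (some t)]).length = ded.length + 1 := by simp
      rw [h4]
      by_cases hb : ded.length + 1 = 4
      · rw [if_pos (show 4 ≤ ded.length + 1 by omega), if_pos hb]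
      · rw [if_neg (show ¬4 ≤ ded.length + 1 by omega), if_neg hb, ih _ (by omega)]

theorem recentTopicsEq (state : List (String × List String)) :
    recentUniqueTopicsA state = PySem.Set.ofList (recentValuesB state (fun t => t)) := by
  simp only [recentUniqueTopicsA, recentValuesB]
  rw [show (PySem.Set.empty : PySem.Set String) = ([] : List String) from rfl,
      topicsLoopEq _ [] (by simp)]

theorem recentFamiliesEq (state : List (String × List String)) :
    recentUniqueFamiliesA state = PySem.Set.ofList (recentValuesB state (fun t => topicFamily (some t))) := by
  simp only [recentUniqueFamiliesA, recentValuesB]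
  rw [show (PySem.Set.empty : PySem.Set String) = ([] : List String) from rfl,
      familiesLoopEq _ [] (by simp)]

-- zip-with-tiers then select equals a plain filter on the tier
theorem zipFilterEq {α : Type} (tier : α → Nat) (best : Nat) : ∀ (c : List α),
    (c.zip (c.map tier)).filterMap (fun p => if p.2 = best then some p.1 else none)
      = c.filter (fun x => tier x = best) := by
  intro c
  induction c with
  | nil => rfl
  | cons x rest ih =>
    simp only [List.map_cons, List.zip_cons_cons, List.filterMap_cons, List.filter_cons]
    by_cases h : tier x = best
    · simp [h, ih]
    · simp [h, ih]

-- the fallback cascade over nested strata IS min-tier selection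
theorem cascadeEq {α : Type} (c : List α) (hc : c ≠ []) (u r : α → Bool) :
    (let fresh := c.filter (fun x => !u x && !r x)
     if fresh ≠ [] then fresh
     else
       let unused := c.filter (fun x => !u x)
       if unused ≠ [] then unused
       else c)
    = minTierSelectB c (fun x => if u x then 2 else if r x then 1 else 0) := by
  set tier : α → Nat := fun x => if u x then 2 else if r x then 1 else 0 with htier
  have hmapne : c.map tier ≠ [] := by simpa using hc
  obtain ⟨best, hbest⟩ : ∃ b, PySem.List.min? (c.map tier) (fun t => t) = some b := by
    rcases h : PySem.List.min? (c.map tier) (fun t => t) with _ | b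
    · exact absurd ((PySem.List.min?_eq_none_iff _ _).mp h) hmapne
    · exact ⟨b, rfl⟩
  have hmem : best ∈ c.map tier := PySem.List.min?_mem hbest
  have hmin : ∀ y ∈ c.map tier, best ≤ y := fun y hy => PySem.List.min?_isMin hbest y hy
  obtain ⟨w, hwc, hwt⟩ := List.mem_map.mp hmem
  simp only [minTierSelectB, hbest, zipFilterEq]
  by_cases h0 : c.filter (fun x => !u x && !r x) ≠ []
  · rw [if_pos h0]
    obtain ⟨x, hxc, hxp⟩ := existsOfFilterNeNil h0
    have hx0 : tier x = 0 := by
      simp only [Bool.and_eq_true, Bool.not_eq_true'] at hxp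
      simp [htier, hxp.1, hxp.2]
    have hbest0 : best = 0 := by
      have := hmin (tier x) (List.mem_map.mpr ⟨x, hxc, rfl⟩)
      omega
    rw [hbest0]
    apply List.filter_congr
    intro y hy
    simp only [htier]
    by_cases hu : u y <;> by_cases hr : r y <;> simp [hu, hr]
  · rw [if_neg h0]
    push_neg at h0
    have hall0 : ∀ y ∈ c, ¬(u y = false ∧ r y = false) := by
      intro y hyc hy
      have : y ∈ c.filter (fun x => !u x && !r x) := by
        simp [List.mem_filter, hyc, hy.1, hy.2]
      rw [h0] at this; simp at this
    by_cases h1 : c.filter (fun x => !u x) ≠ []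
    · rw [if_pos h1]
      obtain ⟨x, hxc, hxp⟩ := existsOfFilterNeNil h1
      simp only [Bool.not_eq_true'] at hxp
      have hrx : r x = true := by
        rcases hr : r x with _ | _
        · exact absurd ⟨hxp, hr⟩ (hall0 x hxc)
        · rfl
      have hx1 : tier x = 1 := by simp [htier, hxp, hrx]
      have hble : best ≤ 1 := by
        have := hmin (tier x) (List.mem_map.mpr ⟨x, hxc, rfl⟩)
        omega
      have hbest1 : best = 1 := by
        rcases Nat.lt_or_ge best 1 with hlt | hge
        · exfalso
          have hw0 : tier w = 0 := by omega
          have : u w = false ∧ r w = false := by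
            by_cases hu : u w <;> by_cases hr : r w <;> simp_all
          exact hall0 w hwc this
        · omega
      rw [hbest1]
      apply List.filter_congr
      intro y hy
      simp only [htier]
      by_cases hu : u y
      · simp [hu]
      · have huy : u y = false := by simpa using hu
        have hry : r y = true := by
          rcases hr : r y with _ | _
          · exact absurd ⟨huy, hr⟩ (hall0 y hy)
          · rfl
        simp [huy, hry]
    · rw [if_neg h1]
      push_neg at h1
      have hallu : ∀ y ∈ c, u y = true := by
        intro y hyc
        rcases hu : u y with _ | _
        · exfalso
          have : y ∈ c.filter (fun x => !u x) := by simp [List.mem_filter, hyc, hu]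
          rw [h1] at this; simp at this
        · rfl
      have hbest2 : best = 2 := by
        rw [← hwt, htier]; simp [hallu w hwc]
      rw [hbest2]
      symm
      apply List.filter_eq_self.mpr
      intro y hy
      simp [htier, hallu y hy]

-- a min-tier selection of a nonempty list is nonempty
theorem minTierNeNil {α : Type} (c : List α) (hc : c ≠ []) (tier : α → Nat) :
    minTierSelectB c tier ≠ [] := by
  have hmapne : c.map tier ≠ [] := by simpa using hc
  obtain ⟨best, hbest⟩ : ∃ b, PySem.List.min? (c.map tier) (fun t => t) = some b := by
    rcases h : PySem.List.min? (c.map tier) (fun t => t) with _ | b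
    · exact absurd ((PySem.List.min?_eq_none_iff _ _).mp h) hmapne
    · exact ⟨b, rfl⟩
  obtain ⟨w, hwc, hwt⟩ := List.mem_map.mp (PySem.List.min?_mem hbest)
  simp only [minTierSelectB, hbest, zipFilterEq]
  intro hnil
  have : w ∈ c.filter (fun x => decide (tier x = best)) := by
    simp [List.mem_filter, hwc, hwt]
  rw [hnil] at this
  simp at this

-- stage 1: A's coverage cascade equals B's first min-tier pass
theorem stage1Eq (candidates : List (List (String × String))) (state : List (String × List String))
    (used_topics : Option (List String)) (hc : candidates ≠ []) :
    coverageFirstA candidates state used_topics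
      = minTierSelectB candidates (fun item =>
          let t := (PySem.Dict.ofList item).get? "topic"
          if optIn t (PySem.Set.ofList (used_topics.getD [])) then 2
          else if optIn t (recentValuesB state (fun t => t)) then 1 else 0) := by
  simp only [coverageFirstA, if_neg hc, recentTopicsEq, optInOfList]
  exact cascadeEq candidates hc _ _

-- ===== VERDICT (by name: the statement is the Claim_ definition above) =====
theorem family_first_candidates_py_spec : Claim_equal_family_first_candidates_py := by
  intro candidates state used_topics used_families _
  unfold Spec_family_first_candidates_py
  by_cases hc : candidates = []
  · subst hc; rfl
  · simp only [family_first_candidates_py, family_first_candidates_py_alt, if_neg hc]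
    rw [stage1Eq candidates state used_topics hc]
    set c1 := minTierSelectB candidates (fun item =>
          let t := (PySem.Dict.ofList item).get? "topic"
          if optIn t (PySem.Set.ofList (used_topics.getD [])) then 2
          else if optIn t (recentValuesB state (fun t => t)) then 1 else 0) with hc1
    have hc1ne : c1 ≠ [] := minTierNeNil candidates hc _
    rw [if_neg hc1ne]
    simp only [recentFamiliesEq, containsOfList]
    exact cascadeEq c1 hc1ne _ _
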